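-- pv_equiv track=rewrite | github.com/MrHamdulay/csc3-capstone | examples/data/Assignment_4/srkmoh002/ndom.py | ndom_multiply
-- ===== SOURCE A (Python) =====
-- def ndom_multiply(a,b):
--     d1=a
--     decimal=0
--     i=0
--     while d1!=0:
--         decimal=decimal+((d1%10)*(6**i))
--         i=i+1
--         d1=d1//10
--     decimal1=int(decimal)
--
--     d2=b
--     decimal=0
--     i=0
--     while d2!=0:
--         decimal=decimal+((d2%10)*(6**i))
--         i=i+1
--         d2=d2//10
--     decimal2=int(decimal)
--
--     decimal3=(decimal1)*(decimal2)
--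
--     d=decimal3
--     ndom=0
--     i=0
--     while d!=0:
--         ndom=ndom+((d%6)*(10**i))
--         i=i+1
--         d=d//6
--     ndom=int(ndom)
--     return ndom
-- ===== SOURCE B (Python) =====
-- def ndom_multiply(a, b):
--     # Recursive Horner decoding/encoding instead of iterative power-of-base accumulation.
--     def to_dec(n):
--         return 0 if n == 0 else to_dec(n // 10) * 6 + n % 10
--
--     def to_ndom(n):
--         return 0 if n == 0 else to_ndom(n // 6) * 10 + n % 6
--
--     return to_ndom(to_dec(a) * to_dec(b))
-- ===== Notes on version B (the rewrite author's own statement) =====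
-- stated objective: simpler
-- what changed: Replaces A's three iterative while-loops that accumulate digit*base**i with a running exponent counter by two small recursive Horner-style helpers (decode top-down, re-encode the product the same way), with no power computation or index variable.
import Mathlib
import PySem

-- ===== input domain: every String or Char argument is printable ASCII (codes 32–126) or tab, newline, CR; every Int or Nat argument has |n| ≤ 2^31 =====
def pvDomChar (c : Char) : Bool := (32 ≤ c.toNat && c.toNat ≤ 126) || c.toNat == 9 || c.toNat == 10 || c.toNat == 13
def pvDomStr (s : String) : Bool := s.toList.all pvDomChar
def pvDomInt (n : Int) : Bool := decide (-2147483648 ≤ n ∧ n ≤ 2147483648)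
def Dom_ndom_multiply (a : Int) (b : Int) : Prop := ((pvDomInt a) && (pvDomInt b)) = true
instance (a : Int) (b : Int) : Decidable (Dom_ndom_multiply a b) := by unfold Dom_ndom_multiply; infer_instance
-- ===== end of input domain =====

-- B replaces A's three while-loops with running power accumulators by two recursive
-- Horner-style helpers (objective: simpler). Equality of the ports holds unconditionally
-- (on negative inputs both Pythons loop forever; the ports' totality guards there coincide).

-- ===== PORT A =====
-- A's first two while-loops are identical (decode base-6 digits read off the decimal
-- representation, with a running 6**i); one helper used twice.
def pvDecLoop (d : Int) (decimal : Int) (i : Nat) : Int :=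
  if d = 0 then decimal
  else if d < 0 then decimal  -- totality guard: the Python loop never terminates for d < 0 (outside Pre_)
  else pvDecLoop (PySem.Int.floordiv d 10) (decimal + PySem.Int.mod d 10 * (6:Int) ^ i) (i + 1)
termination_by d.toNat
decreasing_by
  rw [PySem.Int.floordiv_eq_ediv_of_pos (by norm_num)]
  omega

-- A's third while-loop: re-encode in base 6, digits written in decimal with a running 10**i.
def pvEncLoop (d : Int) (ndom : Int) (i : Nat) : Int :=
  if d = 0 then ndom
  else if d < 0 then ndom  -- totality guard: the Python loop never terminates for d < 0 (outside Pre_)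
  else pvEncLoop (PySem.Int.floordiv d 6) (ndom + PySem.Int.mod d 6 * (10:Int) ^ i) (i + 1)
termination_by d.toNat
decreasing_by
  rw [PySem.Int.floordiv_eq_ediv_of_pos (by norm_num)]
  omega

def ndom_multiply (a : Int) (b : Int) : Int :=
  let decimal1 := pvDecLoop a 0 0
  let decimal2 := pvDecLoop b 0 0
  let decimal3 := decimal1 * decimal2
  pvEncLoop decimal3 0 0

-- ===== PORT B =====
def pvToDec (n : Int) : Int :=
  if n = 0 then 0
  else if n < 0 then 0  -- totality guard: the Python recursion never terminates for n < 0 (outside Pre_)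
  else pvToDec (PySem.Int.floordiv n 10) * 6 + PySem.Int.mod n 10
termination_by n.toNat
decreasing_by
  rw [PySem.Int.floordiv_eq_ediv_of_pos (by norm_num)]
  omega

def pvToNdom (n : Int) : Int :=
  if n = 0 then 0
  else if n < 0 then 0  -- totality guard: the Python recursion never terminates for n < 0 (outside Pre_)
  else pvToNdom (PySem.Int.floordiv n 6) * 10 + PySem.Int.mod n 6
termination_by n.toNat
decreasing_by
  rw [PySem.Int.floordiv_eq_ediv_of_pos (by norm_num)]
  omega

def ndom_multiply_alt (a : Int) (b : Int) : Int :=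
  pvToNdom (pvToDec a * pvToDec b)

-- ===== PRECONDITION & SPEC =====
def Spec_ndom_multiply (a : Int) (b : Int) (out : Int) : Prop := out = ndom_multiply_alt a b
instance (a : Int) (b : Int) (out : Int) : Decidable (Spec_ndom_multiply a b out) := by unfold Spec_ndom_multiply; infer_instance

-- ===== CLAIM (what is proved, stated in full; the proofs are below) =====
def Claim_equal_ndom_multiply : Prop := ∀ (a : Int) (b : Int), Dom_ndom_multiply a b → Spec_ndom_multiply a b (ndom_multiply a b)

-- ===== LEMMAS AND PROOFS =====
theorem pvDecLoop_eq (d decimal : Int) (i : Nat) :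
    pvDecLoop d decimal i = decimal + (6:Int) ^ i * pvToDec d := by
  fun_induction pvDecLoop d decimal i with
  | case1 decimal i =>
      simp [pvToDec]
  | case2 d decimal i h hneg =>
      rw [pvToDec]
      simp [h, hneg]
  | case3 d decimal i h hneg ih =>
      rw [ih]
      conv_rhs => rw [pvToDec]
      simp only [if_neg h, if_neg hneg]
      ring

theorem pvEncLoop_eq (d ndom : Int) (i : Nat) :
    pvEncLoop d ndom i = ndom + (10:Int) ^ i * pvToNdom d := by
  fun_induction pvEncLoop d ndom i with
  | case1 ndom i =>
      simp [pvToNdom]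
  | case2 d ndom i h hneg =>
      rw [pvToNdom]
      simp [h, hneg]
  | case3 d ndom i h hneg ih =>
      rw [ih]
      conv_rhs => rw [pvToNdom]
      simp only [if_neg h, if_neg hneg]
      ring

-- ===== VERDICT (by name: the statement is the Claim_ definition above) =====
theorem ndom_multiply_spec : Claim_equal_ndom_multiply := by
  intro a b _
  unfold Spec_ndom_multiply ndom_multiply ndom_multiply_alt
  simp [pvDecLoop_eq, pvEncLoop_eq]
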